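-- pv_equiv track=rewrite | github.com/TheSolipsist/pymeleon | neural_net/training_generation.py | hash_graph_representation
-- ===== SOURCE A (Python) =====
-- def hash_graph_representation(representation: list, num_constraint_types: int) -> int:
--     """
--     Returns a unique hash for a connected graph's representation
--     """
--     graph_hash = 0
--     node_vector_length = num_constraint_types + 1  # Includes the "order" int
--     base = max(representation) + node_vector_length
--     for exponent in range(len(representation) // node_vector_length):
--         for i in range(node_vector_length):
--             graph_hash += (base ** exponent) * representation[exponent * node_vector_length + i] + 1
--     return graph_hash
-- ===== SOURCE B (Python) =====
-- def hash_graph_representation(representation: list, num_constraint_types: int) -> int: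
--     """
--     Returns a unique hash for a connected graph's representation.
--     Horner's scheme over the blocks, processed back-to-front: no base powers
--     are ever computed; each step folds acc = acc * base + sum(block), and the
--     +1-per-element contributions are tallied alongside.
--     """
--     node_vector_length = num_constraint_types + 1
--     base = max(representation) + node_vector_length
--     nblocks = len(representation) // node_vector_length
--     acc = 0
--     ones = 0
--     for e in range(nblocks - 1, -1, -1):
--         acc = acc * base + sum(representation[e * node_vector_length:(e + 1) * node_vector_length])
--         ones += node_vector_length
--     return acc + ones
-- ===== Notes on version B (the rewrite author's own statement) =====
-- stated objective: faster
-- what changed: Replaced A's forward nested loop with explicit base**exponent per element by a back-to-front Horner evaluation over block sums (acc = acc*base + sum(block), no powers computed), adding the +1-per-element contribution once at the end.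
import Mathlib
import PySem

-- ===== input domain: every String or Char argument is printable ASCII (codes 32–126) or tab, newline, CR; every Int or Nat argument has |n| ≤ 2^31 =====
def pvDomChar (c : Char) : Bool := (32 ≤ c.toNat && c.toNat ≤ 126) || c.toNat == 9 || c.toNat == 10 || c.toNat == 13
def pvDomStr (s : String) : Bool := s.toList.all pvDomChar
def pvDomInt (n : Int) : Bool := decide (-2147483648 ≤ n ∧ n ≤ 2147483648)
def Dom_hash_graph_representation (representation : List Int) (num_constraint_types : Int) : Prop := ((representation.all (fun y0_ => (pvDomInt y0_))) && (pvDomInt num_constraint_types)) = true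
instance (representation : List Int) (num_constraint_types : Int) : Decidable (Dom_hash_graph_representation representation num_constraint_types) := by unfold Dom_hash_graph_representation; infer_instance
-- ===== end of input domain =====

-- B replaces A's forward nested loop with explicit base ** exponent per element by a
-- back-to-front Horner evaluation over block sums (no powers computed); same return value on Pre_.

-- ===== PORT A =====
def hash_graph_representation (representation : List Int) (num_constraint_types : Int) : Int :=
  let node_vector_length := num_constraint_types + 1
  let base := (PySem.List.max? representation (fun x => x)).getD 0 + node_vector_length
  (PySem.List.pyRange 0 (PySem.Int.floordiv (representation.length : Int) node_vector_length)).foldl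
    (fun graph_hash exponent =>
      (PySem.List.pyRange 0 node_vector_length).foldl
        (fun gh i =>
          gh + base ^ exponent.toNat *
            PySem.List.pyGetD representation (exponent * node_vector_length + i) 0 + 1)
        graph_hash)
    0

-- ===== PORT B =====
def hash_graph_representation_alt (representation : List Int) (num_constraint_types : Int) : Int :=
  let node_vector_length := num_constraint_types + 1
  let base := (PySem.List.max? representation (fun x => x)).getD 0 + node_vector_length
  let nblocks := PySem.Int.floordiv (representation.length : Int) node_vector_length
  let res := (PySem.List.pyRange (nblocks - 1) (-1) (-1)).foldl
    (fun (st : Int × Int) e =>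
      (st.1 * base +
         (PySem.List.slice representation (some (e * node_vector_length))
           (some ((e + 1) * node_vector_length))).sum,
       st.2 + node_vector_length))
    (0, 0)
  res.1 + res.2

-- ===== PRECONDITION & SPEC =====
-- A raises ValueError on representation = [] (max of an empty sequence) and
-- ZeroDivisionError when num_constraint_types = -1; exactly those inputs are excluded.
def Pre_hash_graph_representation (representation : List Int) (num_constraint_types : Int) : Prop :=
  representation ≠ [] ∧ num_constraint_types + 1 ≠ 0
instance (representation : List Int) (num_constraint_types : Int) : Decidable (Pre_hash_graph_representation representation num_constraint_types) := by unfold Pre_hash_graph_representation; infer_instance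

def pvWitness_hash_graph_representation : List Int × Int := ([3, 1, 2, 0], 1)

def Spec_hash_graph_representation (representation : List Int) (num_constraint_types : Int) (out : Int) : Prop := out = hash_graph_representation_alt representation num_constraint_types
instance (representation : List Int) (num_constraint_types : Int) (out : Int) : Decidable (Spec_hash_graph_representation representation num_constraint_types out) := by unfold Spec_hash_graph_representation; infer_instance

-- ===== CLAIM (what is proved, stated in full; the proofs are below) =====
def Claim_equal_hash_graph_representation : Prop := ∀ (representation : List Int) (num_constraint_types : Int), Dom_hash_graph_representation representation num_constraint_types → Pre_hash_graph_representation representation num_constraint_types → Spec_hash_graph_representation representation num_constraint_types (hash_graph_representation representation num_constraint_types)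

-- ===== LEMMAS AND PROOFS =====

-- A's inner loop over one block adds p * (block sum) + block length.
lemma pv_inner_block (rep : List Int) (p : Int) (m s : Nat) :
    ∀ (t : Int), s + m ≤ rep.length →
      (PySem.List.pyRange 0 (m : Int)).foldl
          (fun gh i => gh + p * PySem.List.pyGetD rep ((s : Int) + i) 0 + 1) t
        = t + p * ((rep.drop s).take m).sum + (m : Int) := by
  induction m with
  | zero =>
      intro t _
      simp [PySem.List.pyRange_one_eq_nil (le_refl (0 : Int))]
  | succ m ih =>
      intro t hm
      have hpeel : PySem.List.pyRange 0 ((m : Int) + 1)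
          = PySem.List.pyRange 0 (m : Int) ++ [(m : Int)] :=
        PySem.List.pyRange_one_succ_right (by exact_mod_cast Nat.zero_le m)
      have hcast : ((m + 1 : Nat) : Int) = (m : Int) + 1 := by push_cast; ring
      rw [hcast, hpeel, List.foldl_append, ih t (by omega)]
      have hidx : (s : Int) + (m : Int) = ((s + m : Nat) : Int) := by push_cast; ring
      have hlt : s + m < rep.length := by omega
      have hget : PySem.List.pyGetD rep ((s + m : Nat) : Int) 0 = rep[s + m]'(by omega) := by
        rw [PySem.List.pyGetD_natCast]
        exact List.getD_eq_getElem rep 0 hlt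
      have htake : ((rep.drop s).take (m + 1)).sum
          = ((rep.drop s).take m).sum + rep[s + m]'(by omega) := by
        rw [List.take_add_one]
        have hdrop : (rep.drop s)[m]? = some (rep[s + m]'(by omega)) := by
          rw [List.getElem?_drop]
          exact List.getElem?_eq_getElem (by omega)
        simp [hdrop]
      simp only [List.foldl_cons, List.foldl_nil, hidx, hget, htake]
      ring

-- A's hash after n blocks is the explicit power sum plus n * block length.
lemma pv_A_sum (rep : List Int) (base : Int) (nvlN : Nat) :
    ∀ (n : Nat), n * nvlN ≤ rep.length →
      (PySem.List.pyRange 0 (n : Int)).foldl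
          (fun graph_hash e =>
            (PySem.List.pyRange 0 (nvlN : Int)).foldl
              (fun gh i =>
                gh + base ^ e.toNat * PySem.List.pyGetD rep (e * (nvlN : Int) + i) 0 + 1)
              graph_hash)
          0
        = (∑ e ∈ Finset.range n, base ^ e * ((rep.drop (e * nvlN)).take nvlN).sum)
          + ((n * nvlN : Nat) : Int) := by
  intro n
  induction n with
  | zero =>
      intro _
      simp [PySem.List.pyRange_one_eq_nil (le_refl (0 : Int))]
  | succ n ih =>
      intro hn
      have hn' : n * nvlN ≤ rep.length := by
        have h1 : n * nvlN ≤ (n + 1) * nvlN := Nat.mul_le_mul_right nvlN (Nat.le_succ n)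
        omega
      have hpeel : PySem.List.pyRange 0 ((n : Int) + 1)
          = PySem.List.pyRange 0 (n : Int) ++ [(n : Int)] :=
        PySem.List.pyRange_one_succ_right (by exact_mod_cast Nat.zero_le n)
      have hcast : ((n + 1 : Nat) : Int) = (n : Int) + 1 := by push_cast; ring
      rw [hcast, hpeel, List.foldl_append, ih hn']
      simp only [List.foldl_cons, List.foldl_nil]
      have hidx : ∀ i : Int, (n : Int) * (nvlN : Int) + i = ((n * nvlN : Nat) : Int) + i := by
        intro i; push_cast; ring
      have hinner := pv_inner_block rep (base ^ n) nvlN (n * nvlN)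
        ((∑ e ∈ Finset.range n, base ^ e * ((rep.drop (e * nvlN)).take nvlN).sum)
          + ((n * nvlN : Nat) : Int))
        (by have : (n + 1) * nvlN = n * nvlN + nvlN := by ring
            omega)
      simp only [hidx, Int.toNat_natCast] at hinner ⊢
      rw [hinner, Finset.sum_range_succ]
      push_cast
      ring

-- B's Horner fold over blocks n-1 … 0: from (acc, ones) it reaches
-- (acc * base^n + the power sum, ones + n * block length).  No length bound is needed.
lemma pv_horner (rep : List Int) (base : Int) (nvlN : Nat) :
    ∀ (n : Nat) (acc ones : Int),
      (PySem.List.pyRange ((n : Int) - 1) (-1) (-1)).foldl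
          (fun (st : Int × Int) e =>
            (st.1 * base +
               (PySem.List.slice rep (some (e * (nvlN : Int)))
                 (some ((e + 1) * (nvlN : Int)))).sum,
             st.2 + (nvlN : Int)))
          (acc, ones)
        = (acc * base ^ n
            + ∑ e ∈ Finset.range n, base ^ e * ((rep.drop (e * nvlN)).take nvlN).sum,
           ones + ((n * nvlN : Nat) : Int)) := by
  intro n
  induction n with
  | zero =>
      intro acc ones
      rw [show ((0:Nat):Int) - 1 = (-1:Int) by norm_num, PySem.List.pyRange_neg_one_eq_nil le_rfl]
      simp
  | succ n ih =>
      intro acc ones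
      have hcast : ((n + 1 : Nat) : Int) - 1 = (n : Int) := by push_cast; ring
      have hpeel : PySem.List.pyRange (n : Int) (-1) (-1)
          = (n : Int) :: PySem.List.pyRange ((n : Int) - 1) (-1) (-1) :=
        PySem.List.pyRange_neg_one_cons (by omega)
      rw [hcast, hpeel, List.foldl_cons, ih]
      have hslice : PySem.List.slice rep (some ((n : Int) * (nvlN : Int)))
            (some (((n : Int) + 1) * (nvlN : Int)))
          = (rep.drop (n * nvlN)).take nvlN := by
        have h := PySem.List.slice_natCast_add rep (n * nvlN) nvlN
        have h1 : ((n * nvlN : Nat) : Int) = (n : Int) * (nvlN : Int) := by push_cast; ring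
        rw [h1] at h
        have h2 : ((n : Int) + 1) * (nvlN : Int) = (n : Int) * (nvlN : Int) + (nvlN : Int) := by
          ring
        rw [h2]
        exact h
      rw [hslice]
      have hsum : ∑ e ∈ Finset.range (n + 1), base ^ e * ((rep.drop (e * nvlN)).take nvlN).sum
          = (∑ e ∈ Finset.range n, base ^ e * ((rep.drop (e * nvlN)).take nvlN).sum)
            + base ^ n * ((rep.drop (n * nvlN)).take nvlN).sum := Finset.sum_range_succ _ _
      simp only [Prod.mk.injEq]
      constructor
      · rw [hsum, pow_succ]; ring
      · push_cast; ring

-- ===== VERDICT (by name: the statement is the Claim_ definition above) =====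
theorem hash_graph_representation_spec : Claim_equal_hash_graph_representation := by
  intro rep nct _hdom hpre
  obtain ⟨hne, hnvl⟩ := hpre
  unfold Spec_hash_graph_representation
  simp only [hash_graph_representation, hash_graph_representation_alt]
  set nvl : Int := nct + 1 with hnvl_def
  set q : Int := PySem.Int.floordiv (rep.length : Int) nvl with hq_def
  by_cases hq : q ≤ 0
  · have hq0 : q - 1 ≤ -1 := by omega
    rw [PySem.List.pyRange_one_eq_nil hq, PySem.List.pyRange_neg_one_eq_nil hq0]
    simp
  · rw [Int.not_le] at hq
    have hnvl_pos : 0 < nvl := by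
      rcases lt_trichotomy nvl 0 with h | h | h
      · exfalso
        have hle : q ≤ 0 := by
          rw [hq_def]
          exact Int.fdiv_nonpos_of_nonneg_of_nonpos
            (by exact_mod_cast Nat.zero_le rep.length) (le_of_lt h)
        omega
      · exact absurd h hnvl
      · exact h
    have hmul : q * nvl ≤ (rep.length : Int) :=
      (PySem.Int.le_floordiv_iff_mul_le hnvl_pos).mp (le_of_eq hq_def)
    set nvlN : Nat := nvl.toNat with hnvlN
    set n : Nat := q.toNat with hn
    have hnvl_eq : nvl = (nvlN : Int) := by omega
    have hq_eq : q = (n : Int) := by omega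
    have hlen : n * nvlN ≤ rep.length := by
      have hc : ((n * nvlN : Nat) : Int) ≤ (rep.length : Int) := by
        push_cast
        rw [← hq_eq, ← hnvl_eq]
        exact hmul
      exact_mod_cast hc
    rw [hq_eq, hnvl_eq,
      pv_A_sum rep ((PySem.List.max? rep (fun x => x)).getD 0 + (nvlN : Int)) nvlN n hlen,
      pv_horner rep ((PySem.List.max? rep (fun x => x)).getD 0 + (nvlN : Int)) nvlN n 0 0]
    ring
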